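-- pv_equiv track=rewrite | github.com/adam5644/HackerRank_Leetcode_and_SQL | HackerRank/Lily's Homework.py | calc_swaps_num
-- ===== SOURCE A (Python) =====
-- def calc_swaps_num(arr, target):
--     # To avoid modifying the original array passed to calc_swaps_num, work on a copy
--     arr = arr[:]
--     # Map each element to its index in the target sorted array for quick lookup
--     target_index = {value: idx for idx, value in enumerate(target)}
--     swaps = 0
--     for i in range(len(arr)):
--         # Correct position of current element in the target array
--         correct_pos = target_index[arr[i]]
--         # If element is not in the correct position, swap it with the element that is currently in its correct position
--         while i != correct_pos:
--             # Position of the element that should be at i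
--             to_swap_idx = target_index[arr[i]]
--             # Swap elements
--             arr[i], arr[to_swap_idx] = arr[to_swap_idx], arr[i]
--             # Update the position, since arr[i] has changed
--             correct_pos = target_index[arr[i]]
--             swaps += 1
--     return swaps
-- ===== SOURCE B (Python) =====
-- def calc_swaps_num(arr, target):
--     # Cycle decomposition: minimum swaps = sum over permutation cycles of (length - 1).
--     # arr is never mutated.
--     pos = {v: i for i, v in enumerate(target)}
--     perm = [pos[v] for v in arr]
--     n = len(arr)
--     visited = [False] * n
--     swaps = 0
--     for i in range(n):
--         if visited[i]:
--             continue
--         j = i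
--         clen = 0
--         while not visited[j]:
--             visited[j] = True
--             j = perm[j]
--             clen += 1
--         swaps += clen - 1
--     return swaps
-- ===== Notes on version B (the rewrite author's own statement) =====
-- stated objective: alternative
-- what changed: B counts minimum swaps by cycle decomposition of the permutation i -> target-index-of-arr[i] (visited array, each cycle contributes length-1) instead of simulating the in-place cycle sort on a mutable copy of arr.
import Mathlib
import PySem

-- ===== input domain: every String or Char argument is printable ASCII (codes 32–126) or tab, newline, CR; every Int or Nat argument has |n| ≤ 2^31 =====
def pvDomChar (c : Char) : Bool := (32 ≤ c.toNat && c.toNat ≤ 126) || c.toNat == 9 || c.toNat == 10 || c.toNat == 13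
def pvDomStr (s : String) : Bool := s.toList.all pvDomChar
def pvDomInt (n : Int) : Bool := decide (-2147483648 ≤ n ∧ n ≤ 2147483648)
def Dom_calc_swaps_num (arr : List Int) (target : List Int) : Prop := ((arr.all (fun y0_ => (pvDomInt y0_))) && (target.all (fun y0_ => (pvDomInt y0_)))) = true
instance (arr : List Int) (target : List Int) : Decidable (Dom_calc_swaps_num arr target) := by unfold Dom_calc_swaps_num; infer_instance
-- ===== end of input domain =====

-- B replaces A's in-place cycle-sort simulation by counting permutation cycles with a
-- visited array (objective: alternative algorithm of the same cost; arr is not mutated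
-- by either the Lean ports or B; Python A only mutates a local copy).

-- ===== PORT A =====
-- {value: idx for idx, value in enumerate(target)}
def pvAIndexDict (target : List Int) : PySem.Dict Int Int :=
  (PySem.List.enumerate target 0).foldl (fun d p => d.insert p.2 p.1) PySem.Dict.empty

-- the 'while i != correct_pos' loop, fuelled (len(arr)+1 steps always suffice under
-- Pre_; on inputs outside Pre_ the Python can diverge). correct_pos is re-read as
-- tidx[arr[i]] at the top of each iteration, exactly as A maintains it. List indexing
-- uses getD: under Pre_ every index A uses is in range, so this equals Python's xs[i].
def pvAWhile (tidx : PySem.Dict Int Int) (i : Nat) : Nat → List Int × Int → List Int × Int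
  | 0, st => st
  | fuel+1, st =>
    let cp := tidx.getD (st.1.getD i 0) 0
    if (i : Int) = cp then st
    else
      let ts := cp.toNat
      let a := st.1.getD i 0
      let b := st.1.getD ts 0
      pvAWhile tidx i fuel ((st.1.set i b).set ts a, st.2 + 1)

def pvAStep (tidx : PySem.Dict Int Int) (n : Nat) (st : List Int × Int) (i : Nat) :
    List Int × Int :=
  pvAWhile tidx i (n + 1) st

def calc_swaps_num (arr : List Int) (target : List Int) : Int :=
  let tidx := pvAIndexDict target
  ((List.range arr.length).foldl (pvAStep tidx arr.length) (arr, 0)).2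

-- ===== PORT B =====
-- pos = {v: i for i, v in enumerate(target)} — the same comprehension A writes,
-- so B's port reuses pvAIndexDict for it

-- the 'while not visited[j]' cycle walk, fuelled (len(arr)+1 suffices under Pre_)
def pvBWhile (perm : List Int) : Nat → Nat → List Bool → Int → List Bool × Int
  | 0, _, vis, clen => (vis, clen)
  | fuel+1, j, vis, clen =>
    if vis.getD j false then (vis, clen)
    else pvBWhile perm fuel (perm.getD j 0).toNat (vis.set j true) (clen + 1)

-- one outer-loop iteration of B ('continue' when already visited)
def pvBStep (perm : List Int) (n : Nat) (st : List Bool × Int) (i : Nat) :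
    List Bool × Int :=
  if st.1.getD i false then st
  else
    let r := pvBWhile perm (n + 1) i st.1 0
    (r.1, st.2 + (r.2 - 1))

def calc_swaps_num_alt (arr : List Int) (target : List Int) : Int :=
  let pos := pvAIndexDict target
  let perm := arr.map (fun v => pos.getD v 0)
  let n := arr.length
  ((List.range n).foldl (pvBStep perm n) (List.replicate n false, 0)).2

-- ===== PRECONDITION & SPEC =====
-- pvLastIdx target v = the index the dict {value: idx for idx, value in enumerate(target)}
-- assigns to v (its LAST occurrence in target; 0 if absent)
def pvLastIdx : List Int → Int → Nat
  | [], _ => 0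
  | _ :: ts, v => if v ∈ ts then pvLastIdx ts v + 1 else 0

-- Pre_ = exactly the inputs on which Python A returns normally: every arr element is a
-- key of the target-index dict, the dict sends distinct positions of arr to distinct
-- indices, and those indices all lie inside arr; otherwise A raises KeyError/IndexError
-- or its while loop never terminates.
def Pre_calc_swaps_num (arr : List Int) (target : List Int) : Prop :=
  (∀ i, i < arr.length → arr.getD i 0 ∈ target ∧ pvLastIdx target (arr.getD i 0) < arr.length) ∧
  (∀ i, i < arr.length → ∀ j, j < arr.length → i ≠ j →
    pvLastIdx target (arr.getD i 0) ≠ pvLastIdx target (arr.getD j 0))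
instance (arr : List Int) (target : List Int) : Decidable (Pre_calc_swaps_num arr target) := by
  unfold Pre_calc_swaps_num; infer_instance

def pvWitness_calc_swaps_num : List Int × List Int := ([3, 1, 2], [1, 2, 3])

def Spec_calc_swaps_num (arr : List Int) (target : List Int) (out : Int) : Prop := out = calc_swaps_num_alt arr target
instance (arr : List Int) (target : List Int) (out : Int) : Decidable (Spec_calc_swaps_num arr target out) := by unfold Spec_calc_swaps_num; infer_instance

-- ===== CLAIM (what is proved, stated in full; the proofs are below) =====
def Claim_equal_calc_swaps_num : Prop := ∀ (arr : List Int) (target : List Int), Dom_calc_swaps_num arr target → Pre_calc_swaps_num arr target → Spec_calc_swaps_num arr target (calc_swaps_num arr target)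

-- ===== LEMMAS AND PROOFS =====

-- the permutation i ↦ index of arr[i] in target
def pvPi (arr target : List Int) (j : Nat) : Nat := pvLastIdx target (arr.getD j 0)

lemma pv_getD_set_self {α : Type} (xs : List α) (i : Nat) (h : i < xs.length) (v d : α) :
    (xs.set i v).getD i d = v := by
  simp [List.getD_eq_getElem?_getD, h]

lemma pv_getD_set_ne {α : Type} (xs : List α) (i j : Nat) (v d : α) (h : i ≠ j) :
    (xs.set i v).getD j d = xs.getD j d := by
  simp [List.getD_eq_getElem?_getD, h]

lemma pv_getD_eq {α : Type} (xs : List α) (j : Nat) (d : α) (h : j < xs.length) :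
    xs.getD j d = xs[j] := by
  simp [List.getD_eq_getElem?_getD, h]

-- one unfolding of A's while loop
lemma pvAWhile_succ (tidx : PySem.Dict Int Int) (i fuel : Nat) (s : List Int) (swaps : Int) :
    pvAWhile tidx i (fuel + 1) (s, swaps) =
      if (i : Int) = tidx.getD (s.getD i 0) 0 then (s, swaps)
      else pvAWhile tidx i fuel
        ((s.set i (s.getD (tidx.getD (s.getD i 0) 0).toNat 0)).set
            (tidx.getD (s.getD i 0) 0).toNat (s.getD i 0), swaps + 1) := rfl

-- one unfolding of B's while loop
lemma pvBWhile_succ (perm : List Int) (fuel j : Nat) (vis : List Bool) (clen : Int) :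
    pvBWhile perm (fuel + 1) j vis clen =
      if vis.getD j false then (vis, clen)
      else pvBWhile perm fuel (perm.getD j 0).toNat (vis.set j true) (clen + 1) := rfl

lemma pv_dict_foldl_getD_of_not_key (l : List (Int × Int)) (d : PySem.Dict Int Int)
    (v : Int) (h : ∀ p ∈ l, p.2 ≠ v) :
    (l.foldl (fun d p => d.insert p.2 p.1) d).getD v 0 = d.getD v 0 := by
  induction l generalizing d with
  | nil => rfl
  | cons p l ih =>
    simp only [List.foldl_cons]
    rw [ih _ (fun q hq => h q (List.mem_cons_of_mem _ hq))]
    exact PySem.Dict.getD_insert_of_ne _ _ _ (fun hvp => h p (List.mem_cons_self) hvp.symm)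

lemma pv_lastIdx_getD (target : List Int) (v : Int) (hv : v ∈ target) :
    target.getD (pvLastIdx target v) 0 = v := by
  induction target with
  | nil => simp at hv
  | cons t ts ih =>
    by_cases hvts : v ∈ ts
    · simp only [pvLastIdx, if_pos hvts, List.getD_cons_succ]
      exact ih hvts
    · have hvt : v = t := by
        rcases List.mem_cons.mp hv with h | h
        · exact h
        · exact absurd h hvts
      subst hvt
      simp [pvLastIdx, hvts]

lemma pv_dict_getD (target : List Int) (s : Int) (d : PySem.Dict Int Int) (v : Int)
    (hv : v ∈ target) :
    ((PySem.List.enumerate target s).foldl (fun d p => d.insert p.2 p.1) d).getD v 0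
      = s + (pvLastIdx target v : Int) := by
  induction target generalizing s d with
  | nil => simp at hv
  | cons t ts ih =>
    rw [PySem.List.enumerate_cons, List.foldl_cons]
    by_cases hvts : v ∈ ts
    · rw [ih (s + 1) _ hvts]
      simp only [pvLastIdx, if_pos hvts]
      push_cast
      ring
    · have hvt : v = t := by
        rcases List.mem_cons.mp hv with h | h
        · exact h
        · exact absurd h hvts
      subst hvt
      rw [pv_dict_foldl_getD_of_not_key]
      · rw [PySem.Dict.getD_insert_self]
        simp [pvLastIdx, hvts]
      · intro p hp
        rcases (PySem.List.mem_enumerate_iff _ _ _).mp hp with ⟨kk, hkk, rfl⟩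
        intro hviseq
        exact hvts (hviseq ▸ List.getElem_mem hkk)


lemma pv_tidx_getD (target : List Int) (v : Int) (hv : v ∈ target) :
    (pvAIndexDict target).getD v 0 = (pvLastIdx target v : Int) := by
  unfold pvAIndexDict
  rw [pv_dict_getD target 0 _ v hv]
  simp


lemma pv_pi_lt (arr target : List Int) (hpre : Pre_calc_swaps_num arr target) (j : Nat)
    (hj : j < arr.length) : pvPi arr target j < arr.length :=
  (hpre.1 j hj).2


lemma pv_target_pi (arr target : List Int) (hpre : Pre_calc_swaps_num arr target) (j : Nat)
    (hj : j < arr.length) : target.getD (pvPi arr target j) 0 = arr.getD j 0 :=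
  pv_lastIdx_getD target _ (hpre.1 j hj).1


lemma pv_pi_inj (arr target : List Int) (hpre : Pre_calc_swaps_num arr target)
    (a b : Nat) (ha : a < arr.length) (hb : b < arr.length)
    (h : pvPi arr target a = pvPi arr target b) : a = b := by
  by_contra hne
  exact hpre.2 a ha b hb hne h


lemma pv_iter_lt (arr target : List Int) (hpre : Pre_calc_swaps_num arr target) (i : Nat)
    (hi : i < arr.length) (m : Nat) : (pvPi arr target)^[m] i < arr.length := by
  induction m with
  | zero => simpa using hi
  | succ m ih =>
    rw [Function.iterate_succ_apply']
    exact pv_pi_lt arr target hpre _ ih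

lemma pv_cancel (arr target : List Int) (hpre : Pre_calc_swaps_num arr target)
    (i : Nat) (hi : i < arr.length) (a b : Nat) (hab : a ≤ b)
    (h : (pvPi arr target)^[a] i = (pvPi arr target)^[b] i) :
    (pvPi arr target)^[b - a] i = i := by
  induction a generalizing b with
  | zero =>
    simp only [Function.iterate_zero_apply] at h
    simpa using h.symm
  | succ a ih =>
    obtain ⟨b', rfl⟩ : ∃ b', b = b' + 1 := ⟨b - 1, by omega⟩
    rw [Function.iterate_succ_apply', Function.iterate_succ_apply'] at h
    have h' := pv_pi_inj arr target hpre _ _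
      (pv_iter_lt arr target hpre i hi a) (pv_iter_lt arr target hpre i hi b') h
    have := ih b' (by omega) h'
    simpa [Nat.succ_sub_succ] using this

lemma pv_cycle (arr target : List Int) (hpre : Pre_calc_swaps_num arr target)
    (i : Nat) (hi : i < arr.length) :
    ∃ k, 1 ≤ k ∧ k ≤ arr.length ∧ (pvPi arr target)^[k] i = i ∧
      ∀ m, 1 ≤ m → m < k → (pvPi arr target)^[m] i ≠ i := by
  have hn : 0 < arr.length := by omega
  have hcard : Fintype.card (Fin arr.length) < Fintype.card (Fin (arr.length + 1)) := by
    simp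
  obtain ⟨a, b, hab, hfab⟩ := Fintype.exists_ne_map_eq_of_card_lt
    (fun m : Fin (arr.length + 1) =>
      (⟨(pvPi arr target)^[m.1] i, pv_iter_lt arr target hpre i hi m.1⟩ : Fin arr.length)) hcard
  have hval : (pvPi arr target)^[a.1] i = (pvPi arr target)^[b.1] i := by
    simpa [Fin.ext_iff] using hfab
  have hP : ∃ m, 0 < m ∧ m ≤ arr.length ∧ (pvPi arr target)^[m] i = i := by
    rcases Nat.lt_or_ge a.1 b.1 with hlt | hge
    · exact ⟨b.1 - a.1, by omega, by omega, pv_cancel arr target hpre i hi _ _ (by omega) hval⟩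
    · have hlt : b.1 < a.1 := by
        rcases Nat.lt_or_ge b.1 a.1 with h | h
        · exact h
        · exact absurd (Fin.ext (by omega)) hab
      exact ⟨a.1 - b.1, by omega, by omega, pv_cancel arr target hpre i hi _ _ (by omega) hval.symm⟩
  have hEx : ∃ m, 0 < m ∧ (pvPi arr target)^[m] i = i := by
    obtain ⟨m, h1, _, h3⟩ := hP
    exact ⟨m, h1, h3⟩
  classical
  refine ⟨Nat.find hEx, (Nat.find_spec hEx).1, ?_, (Nat.find_spec hEx).2, ?_⟩
  · obtain ⟨m, h1, h2, h3⟩ := hP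
    exact le_trans (Nat.find_min' hEx ⟨h1, h3⟩) h2
  · intro m hm1 hmk hmi
    exact Nat.find_min hEx hmk ⟨by omega, hmi⟩

lemma pv_distinct (arr target : List Int) (hpre : Pre_calc_swaps_num arr target)
    (i : Nat) (hi : i < arr.length) (k : Nat)
    (hmin : ∀ m, 1 ≤ m → m < k → (pvPi arr target)^[m] i ≠ i)
    (a b : Nat) (hab : a < b) (hbk : b < k) :
    (pvPi arr target)^[a] i ≠ (pvPi arr target)^[b] i := by
  intro h
  have := pv_cancel arr target hpre i hi a b (by omega) h
  exact hmin (b - a) (by omega) (by omega) this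

lemma pv_innerA (arr target : List Int) (hpre : Pre_calc_swaps_num arr target)
    (i k : Nat) (hi : i < arr.length) (hk1 : 1 ≤ k)
    (hcyc : (pvPi arr target)^[k] i = i)
    (hmin : ∀ m, 1 ≤ m → m < k → (pvPi arr target)^[m] i ≠ i) :
    ∀ (m : Nat) (t : Nat), t + m = k - 1 →
    ∀ (s s0 : List Int) (swaps : Int) (fuel : Nat), m < fuel →
    s.length = arr.length →
    s.getD i 0 = arr.getD ((pvPi arr target)^[t] i) 0 →
    (∀ m', 1 ≤ m' → m' ≤ t →
      s.getD ((pvPi arr target)^[m'] i) 0 = target.getD ((pvPi arr target)^[m'] i) 0) →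
    (∀ j, j ≠ i → (∀ m', 1 ≤ m' → m' ≤ t → j ≠ (pvPi arr target)^[m'] i) →
      s.getD j 0 = s0.getD j 0) →
    (∀ m', m' < k → s0.getD ((pvPi arr target)^[m'] i) 0 = arr.getD ((pvPi arr target)^[m'] i) 0) →
    ∃ s' : List Int,
      pvAWhile (pvAIndexDict target) i fuel (s, swaps) = (s', swaps + m) ∧
      s'.length = arr.length ∧
      (∀ m', m' < k →
        s'.getD ((pvPi arr target)^[m'] i) 0 = target.getD ((pvPi arr target)^[m'] i) 0) ∧
      (∀ j, (∀ m', m' < k → j ≠ (pvPi arr target)^[m'] i) → s'.getD j 0 = s0.getD j 0) := by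
  intro m
  induction m with
  | zero =>
    intro t ht s s0 swaps fuel hfuel hlen hsi hdone hrest hfresh0
    obtain ⟨f, rfl⟩ : ∃ f, fuel = f + 1 := ⟨fuel - 1, by omega⟩
    have hti : t + 1 = k := by omega
    have hjt : (pvPi arr target)^[t] i < arr.length := pv_iter_lt arr target hpre i hi t
    have hmem : arr.getD ((pvPi arr target)^[t] i) 0 ∈ target := (hpre.1 _ hjt).1
    have hstep : pvLastIdx target (arr.getD ((pvPi arr target)^[t] i) 0) = (pvPi arr target)^[t+1] i :=
      by rw [Function.iterate_succ_apply']; rfl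
    have hcp : (pvAIndexDict target).getD (s.getD i 0) 0 = (i : Int) := by
      rw [hsi, pv_tidx_getD target _ hmem, hstep, hti, hcyc]
    refine ⟨s, ?_, hlen, ?_, ?_⟩
    · rw [pvAWhile_succ, hcp, if_pos rfl]
      simp
    · intro m' hm'
      rcases Nat.eq_zero_or_pos m' with rfl | hm'pos
      · have h1 : target.getD ((pvPi arr target)^[t+1] i) 0 = arr.getD ((pvPi arr target)^[t] i) 0 := by
          rw [Function.iterate_succ_apply']
          exact pv_target_pi arr target hpre _ hjt
        simp only [Function.iterate_zero_apply]
        calc s.getD i 0 = arr.getD ((pvPi arr target)^[t] i) 0 := hsi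
          _ = target.getD ((pvPi arr target)^[t+1] i) 0 := h1.symm
          _ = target.getD i 0 := by rw [hti, hcyc]
      · exact hdone m' hm'pos (by omega)
    · intro j hj
      exact hrest j (fun hji => hj 0 (by omega) (by simpa using hji))
        (fun m' h1 h2 => hj m' (by omega))
  | succ m'' ih =>
    intro t ht s s0 swaps fuel hfuel hlen hsi hdone hrest hfresh0
    obtain ⟨f, rfl⟩ : ∃ f, fuel = f + 1 := ⟨fuel - 1, by omega⟩
    have htk : t + 1 < k := by omega
    have hjt : (pvPi arr target)^[t] i < arr.length := pv_iter_lt arr target hpre i hi t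
    have hjt1 : (pvPi arr target)^[t+1] i < arr.length := pv_iter_lt arr target hpre i hi (t+1)
    have hmem : arr.getD ((pvPi arr target)^[t] i) 0 ∈ target := (hpre.1 _ hjt).1
    have hstep : pvLastIdx target (arr.getD ((pvPi arr target)^[t] i) 0) = (pvPi arr target)^[t+1] i :=
      by rw [Function.iterate_succ_apply']; rfl
    have hcp : (pvAIndexDict target).getD (s.getD i 0) 0 = (((pvPi arr target)^[t+1] i : Nat) : Int) := by
      rw [hsi, pv_tidx_getD target _ hmem, hstep]
    have hne : (pvPi arr target)^[t+1] i ≠ i := hmin (t+1) (by omega) htk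
    have hcond : ¬((i : Int) = (pvAIndexDict target).getD (s.getD i 0) 0) := by
      rw [hcp]
      intro h
      exact hne (by exact_mod_cast h.symm)
    have havoid : ∀ m', 1 ≤ m' → m' ≤ t → (pvPi arr target)^[t+1] i ≠ (pvPi arr target)^[m'] i := by
      intro m' h1 h2
      exact (pv_distinct arr target hpre i hi k hmin m' (t+1) (by omega) htk).symm
    have hbval : s.getD ((pvPi arr target)^[t+1] i) 0 = arr.getD ((pvPi arr target)^[t+1] i) 0 := by
      rw [hrest _ hne havoid]
      exact hfresh0 (t+1) htk
    have heval : pvAWhile (pvAIndexDict target) i (f + 1) (s, swaps)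
        = pvAWhile (pvAIndexDict target) i f
          ((s.set i (s.getD ((pvPi arr target)^[t+1] i) 0)).set ((pvPi arr target)^[t+1] i)
            (s.getD i 0), swaps + 1) := by
      rw [pvAWhile_succ, if_neg hcond, hcp, Int.toNat_natCast]
    have hlen1 : ((s.set i (s.getD ((pvPi arr target)^[t+1] i) 0)).set ((pvPi arr target)^[t+1] i)
        (s.getD i 0)).length = arr.length := by
      simpa using hlen
    have hsi1 : ((s.set i (s.getD ((pvPi arr target)^[t+1] i) 0)).set ((pvPi arr target)^[t+1] i)
        (s.getD i 0)).getD i 0 = arr.getD ((pvPi arr target)^[t+1] i) 0 := by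
      rw [pv_getD_set_ne _ _ _ _ _ hne, pv_getD_set_self _ _ (by omega) _ _, hbval]
    have hdone1 : ∀ m', 1 ≤ m' → m' ≤ t + 1 →
        ((s.set i (s.getD ((pvPi arr target)^[t+1] i) 0)).set ((pvPi arr target)^[t+1] i)
          (s.getD i 0)).getD ((pvPi arr target)^[m'] i) 0
        = target.getD ((pvPi arr target)^[m'] i) 0 := by
      intro m' h1 h2
      rcases Nat.eq_or_lt_of_le h2 with rfl | hlt
      · rw [pv_getD_set_self _ _ (by simp only [List.length_set]; omega) _ _, hsi, Function.iterate_succ_apply']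
        exact (pv_target_pi arr target hpre _ hjt).symm
      · have hnep : (pvPi arr target)^[t+1] i ≠ (pvPi arr target)^[m'] i := havoid m' h1 (by omega)
        have hnei : i ≠ (pvPi arr target)^[m'] i := (hmin m' h1 (by omega)).symm
        rw [pv_getD_set_ne _ _ _ _ _ hnep, pv_getD_set_ne _ _ _ _ _ hnei]
        exact hdone m' h1 (by omega)
    have hrest1 : ∀ j, j ≠ i → (∀ m', 1 ≤ m' → m' ≤ t + 1 → j ≠ (pvPi arr target)^[m'] i) →
        ((s.set i (s.getD ((pvPi arr target)^[t+1] i) 0)).set ((pvPi arr target)^[t+1] i)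
          (s.getD i 0)).getD j 0 = s0.getD j 0 := by
      intro j hji havj
      have h1 : (pvPi arr target)^[t+1] i ≠ j := fun h => havj (t+1) (by omega) (by omega) h.symm
      have h2 : i ≠ j := fun h => hji h.symm
      rw [pv_getD_set_ne _ _ _ _ _ h1, pv_getD_set_ne _ _ _ _ _ h2]
      exact hrest j hji (fun m' ha hb => havj m' ha (by omega))
    obtain ⟨s', heq, hlen', horb, hrest2⟩ :=
      ih (t + 1) (by omega) _ s0 (swaps + 1) f (by omega) hlen1 hsi1 hdone1 hrest1 hfresh0
    refine ⟨s', ?_, hlen', horb, hrest2⟩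
    rw [heval, heq]
    congr 1
    push_cast
    ring

lemma pv_perm_getD (arr target : List Int) (hpre : Pre_calc_swaps_num arr target)
    (j : Nat) (hj : j < arr.length) :
    (arr.map (fun v => (pvAIndexDict target).getD v 0)).getD j 0 = (pvPi arr target j : Int) := by
  have hjt : j < (arr.map (fun v => (pvAIndexDict target).getD v 0)).length := by
    simpa using hj
  rw [pv_getD_eq _ j 0 hjt]
  simp only [List.getElem_map]
  have hmem : arr[j] ∈ target := by
    have := (hpre.1 j hj).1
    rwa [pv_getD_eq arr j 0 hj] at this
  have h2 : (pvAIndexDict target).getD arr[j] 0 = (pvLastIdx target arr[j] : Int) :=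
    pv_tidx_getD target _ hmem
  rw [h2]
  unfold pvPi
  rw [pv_getD_eq arr j 0 hj]

lemma pv_innerB (arr target : List Int) (hpre : Pre_calc_swaps_num arr target)
    (i k : Nat) (hi : i < arr.length) (hk1 : 1 ≤ k)
    (hcyc : (pvPi arr target)^[k] i = i)
    (hmin : ∀ m, 1 ≤ m → m < k → (pvPi arr target)^[m] i ≠ i) :
    ∀ (m : Nat) (t : Nat), t + m = k →
    ∀ (vis vis0 : List Bool) (clen : Int) (fuel : Nat), m < fuel →
    vis.length = arr.length →
    (∀ j, j < arr.length → (vis.getD j false = true ↔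
      (vis0.getD j false = true ∨ ∃ m', m' < t ∧ j = (pvPi arr target)^[m'] i))) →
    (∀ m', m' < k → vis0.getD ((pvPi arr target)^[m'] i) false = false) →
    ∃ vis' : List Bool,
      pvBWhile (arr.map (fun v => (pvAIndexDict target).getD v 0)) fuel
          ((pvPi arr target)^[t] i) vis clen = (vis', clen + m) ∧
      vis'.length = arr.length ∧
      (∀ j, j < arr.length → (vis'.getD j false = true ↔
        (vis0.getD j false = true ∨ ∃ m', m' < k ∧ j = (pvPi arr target)^[m'] i))) := by
  intro m
  induction m with
  | zero =>
    intro t ht vis vis0 clen fuel hfuel hlen hvis hfresh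
    obtain ⟨f, rfl⟩ : ∃ f, fuel = f + 1 := ⟨fuel - 1, by omega⟩
    have htk : t = k := by omega
    subst htk
    have hv : vis.getD ((pvPi arr target)^[t] i) false = true := by
      rw [hcyc]
      exact (hvis i hi).mpr (Or.inr ⟨0, by omega, by simp⟩)
    refine ⟨vis, ?_, hlen, hvis⟩
    rw [pvBWhile_succ, if_pos hv]
    simp
  | succ m'' ih =>
    intro t ht vis vis0 clen fuel hfuel hlen hvis hfresh
    obtain ⟨f, rfl⟩ : ∃ f, fuel = f + 1 := ⟨fuel - 1, by omega⟩
    have htk : t < k := by omega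
    have hjt : (pvPi arr target)^[t] i < arr.length := pv_iter_lt arr target hpre i hi t
    have hv : vis.getD ((pvPi arr target)^[t] i) false = false := by
      cases h : vis.getD ((pvPi arr target)^[t] i) false with
      | false => rfl
      | true =>
        rcases (hvis _ hjt).mp h with h0 | ⟨m', hm', heqm⟩
        · rw [hfresh t htk] at h0
          exact absurd h0 (by simp)
        · exact absurd heqm.symm (pv_distinct arr target hpre i hi k hmin m' t hm' htk)
    have hpg : (arr.map (fun v => (pvAIndexDict target).getD v 0)).getD ((pvPi arr target)^[t] i) 0
        = ((pvPi arr target) ((pvPi arr target)^[t] i) : Int) :=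
      pv_perm_getD arr target hpre _ hjt
    have heval : pvBWhile (arr.map (fun v => (pvAIndexDict target).getD v 0)) (f + 1)
        ((pvPi arr target)^[t] i) vis clen
        = pvBWhile (arr.map (fun v => (pvAIndexDict target).getD v 0)) f
          ((pvPi arr target)^[t+1] i) (vis.set ((pvPi arr target)^[t] i) true) (clen + 1) := by
      rw [pvBWhile_succ, if_neg (by rw [hv]; simp), hpg, Int.toNat_natCast,
        show (pvPi arr target) ((pvPi arr target)^[t] i) = (pvPi arr target)^[t+1] i from
          (Function.iterate_succ_apply' _ _ _).symm]
    have hvis1 : ∀ j, j < arr.length →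
        ((vis.set ((pvPi arr target)^[t] i) true).getD j false = true ↔
          (vis0.getD j false = true ∨ ∃ m', m' < t + 1 ∧ j = (pvPi arr target)^[m'] i)) := by
      intro j hj
      by_cases hjp : j = (pvPi arr target)^[t] i
      · subst hjp
        rw [pv_getD_set_self _ _ (by omega) _ _]
        simp only [true_iff]
        exact Or.inr ⟨t, by omega, rfl⟩
      · rw [pv_getD_set_ne _ _ _ _ _ (fun h => hjp h.symm)]
        rw [hvis j hj]
        constructor
        · rintro (h | ⟨m', hm', rfl⟩)
          · exact Or.inl h
          · exact Or.inr ⟨m', by omega, rfl⟩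
        · rintro (h | ⟨m', hm', rfl⟩)
          · exact Or.inl h
          · refine Or.inr ⟨m', ?_, rfl⟩
            by_contra h'
            have ht' : m' = t := by omega
            subst ht'
            exact hjp rfl
    obtain ⟨vis', heq, hlen', hchar⟩ :=
      ih (t + 1) (by omega) _ vis0 (clen + 1) f (by omega) (by simpa using hlen) hvis1 hfresh
    refine ⟨vis', ?_, hlen', hchar⟩
    rw [heval, heq]
    congr 1
    push_cast
    ring

lemma pv_outer (arr target : List Int) (hpre : Pre_calc_swaps_num arr target) :
    ∀ (l : List Nat), (∀ i ∈ l, i < arr.length) →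
    ∀ (s : List Int) (vis : List Bool) (cnt : Int),
    s.length = arr.length → vis.length = arr.length →
    (∀ j, j < arr.length → vis.getD j false = true → s.getD j 0 = target.getD j 0) →
    (∀ j, j < arr.length → vis.getD j false = false → s.getD j 0 = arr.getD j 0) →
    (∀ j, j < arr.length → vis.getD (pvPi arr target j) false = true → vis.getD j false = true) →
    (∀ j, j < arr.length → vis.getD j false = true →
      ∃ j', j' < arr.length ∧ pvPi arr target j' = j) →
    (l.foldl (pvAStep (pvAIndexDict target) arr.length) (s, cnt)).2
      = (l.foldl (pvBStep (arr.map (fun v => (pvAIndexDict target).getD v 0)) arr.length) (vis, cnt)).2 := by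
  intro l
  induction l with
  | nil => intro _ s vis cnt _ _ _ _ _ _; rfl
  | cons i l ih =>
    intro hmeml s vis cnt hlens hlenv hctrue hcfalse hclos hsrc
    have hi : i < arr.length := hmeml i List.mem_cons_self
    simp only [List.foldl_cons]
    cases hv : vis.getD i false with
    | true =>
      have hBstep : pvBStep (arr.map (fun v => (pvAIndexDict target).getD v 0)) arr.length
          (vis, cnt) i = (vis, cnt) := by
        unfold pvBStep
        rw [hv]
        simp
      have hsti : s.getD i 0 = target.getD i 0 := hctrue i hi hv
      obtain ⟨j', hj', hpj'⟩ := hsrc i hi hv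
      have harr : target.getD i 0 = arr.getD j' 0 := by
        rw [← hpj']
        exact pv_target_pi arr target hpre j' hj'
      have hmem : arr.getD j' 0 ∈ target := (hpre.1 j' hj').1
      have hcp : (pvAIndexDict target).getD (s.getD i 0) 0 = (i : Int) := by
        rw [hsti, harr, pv_tidx_getD target _ hmem]
        show ((pvPi arr target j' : Nat) : Int) = (i : Int)
        exact_mod_cast hpj' 
      have hAstep : pvAStep (pvAIndexDict target) arr.length (s, cnt) i = (s, cnt) := by
        unfold pvAStep
        rw [pvAWhile_succ, hcp, if_pos rfl]
      rw [hAstep, hBstep]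
      exact ih (fun j hj => hmeml j (List.mem_cons_of_mem _ hj)) s vis cnt hlens hlenv
        hctrue hcfalse hclos hsrc
    | false =>
      obtain ⟨k, hk1, hkn, hcyc, hmin⟩ := pv_cycle arr target hpre i hi
      have hofresh : ∀ m', m' < k → vis.getD ((pvPi arr target)^[m'] i) false = false := by
        intro m'
        induction m' with
        | zero => intro _; simpa using hv
        | succ mm ihm =>
          intro hmk
          cases h : vis.getD ((pvPi arr target)^[mm+1] i) false with
          | false => rfl
          | true =>
            have hjm : (pvPi arr target)^[mm] i < arr.length :=
              pv_iter_lt arr target hpre i hi mm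
            have h' := h
            rw [Function.iterate_succ_apply'] at h'
            have h2 := hclos _ hjm h'
            rw [ihm (by omega)] at h2
            exact absurd h2 (by simp)
      have hA := pv_innerA arr target hpre i k hi hk1 hcyc hmin (k - 1) 0 (by omega)
        s s cnt (arr.length + 1) (by omega) hlens
        (by simpa using hcfalse i hi hv)
        (by intro m' h1 h2; exact absurd h1 (by omega))
        (fun j _ _ => rfl)
        (fun m' hm' => hcfalse _ (pv_iter_lt arr target hpre i hi m') (hofresh m' hm'))
      obtain ⟨s', hAeq, hlen', horb, hrest2⟩ := hA
      have hB := pv_innerB arr target hpre i k hi hk1 hcyc hmin k 0 (by omega)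
        vis vis 0 (arr.length + 1) (by omega) hlenv
        (by
          intro j hj
          constructor
          · exact fun h => Or.inl h
          · rintro (h | ⟨m', hm', _⟩)
            · exact h
            · omega)
        hofresh
      obtain ⟨vis', hBeq, hlenv', hchar⟩ := hB
      simp only [Function.iterate_zero_apply] at hBeq
      have hcast : ((k - 1 : Nat) : Int) = (k : Int) - 1 := by omega
      have hAstep : pvAStep (pvAIndexDict target) arr.length (s, cnt) i
          = (s', cnt + ((k : Int) - 1)) := by
        unfold pvAStep
        rw [hAeq, hcast]
      have hBstep : pvBStep (arr.map (fun v => (pvAIndexDict target).getD v 0)) arr.length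
          (vis, cnt) i = (vis', cnt + ((k : Int) - 1)) := by
        unfold pvBStep
        rw [if_neg (by rw [hv]; simp)]
        rw [hBeq]
        simp
      rw [hAstep, hBstep]
      refine ih (fun j hj => hmeml j (List.mem_cons_of_mem _ hj)) s' vis' (cnt + ((k : Int) - 1))
        hlen' hlenv' ?_ ?_ ?_ ?_
      · intro j hj hvj
        rcases (hchar j hj).mp hvj with hold | ⟨m', hm', rfl⟩
        · have hnotorb : ∀ m', m' < k → j ≠ (pvPi arr target)^[m'] i := by
            intro m' hm' hje
            rw [hje, hofresh m' hm'] at hold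
            exact absurd hold (by simp)
          rw [hrest2 j hnotorb]
          exact hctrue j hj hold
        · exact horb m' hm'
      · intro j hj hvj
        have hnotold : vis.getD j false = false := by
          cases h : vis.getD j false with
          | false => rfl
          | true =>
            have h2 := (hchar j hj).mpr (Or.inl h)
            rw [h2] at hvj
            exact absurd hvj (by simp)
        have hnotorb : ∀ m', m' < k → j ≠ (pvPi arr target)^[m'] i := by
          intro m' hm' hje
          have h2 := (hchar j hj).mpr (Or.inr ⟨m', hm', hje⟩)
          rw [h2] at hvj
          exact absurd hvj (by simp)
        rw [hrest2 j hnotorb]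
        exact hcfalse j hj hnotold
      · intro j hj hpj
        have hpjlt : pvPi arr target j < arr.length := pv_pi_lt arr target hpre j hj
        rcases (hchar _ hpjlt).mp hpj with hold | ⟨m', hm', heqm⟩
        · exact (hchar j hj).mpr (Or.inl (hclos j hj hold))
        · cases m' with
          | zero =>
            have h1 : pvPi arr target j = pvPi arr target ((pvPi arr target)^[k-1] i) := by
              rw [show pvPi arr target ((pvPi arr target)^[k-1] i) = (pvPi arr target)^[k-1+1] i from
                (Function.iterate_succ_apply' _ _ _).symm]
              have hkk : k - 1 + 1 = k := by omega
              rw [hkk, hcyc]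
              simpa using heqm
            have hj2 := pv_pi_inj arr target hpre j _ hj
              (pv_iter_lt arr target hpre i hi (k-1)) h1
            exact (hchar j hj).mpr (Or.inr ⟨k - 1, by omega, hj2⟩)
          | succ mm =>
            have h1 : pvPi arr target j = pvPi arr target ((pvPi arr target)^[mm] i) := by
              rw [show pvPi arr target ((pvPi arr target)^[mm] i) = (pvPi arr target)^[mm+1] i from
                (Function.iterate_succ_apply' _ _ _).symm]
              exact heqm
            have hj2 := pv_pi_inj arr target hpre j _ hj
              (pv_iter_lt arr target hpre i hi mm) h1
            exact (hchar j hj).mpr (Or.inr ⟨mm, by omega, hj2⟩)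
      · intro j hj hvj
        rcases (hchar j hj).mp hvj with hold | ⟨m', hm', rfl⟩
        · exact hsrc j hj hold
        · cases m' with
          | zero =>
            refine ⟨(pvPi arr target)^[k-1] i, pv_iter_lt arr target hpre i hi (k-1), ?_⟩
            have h1 : pvPi arr target ((pvPi arr target)^[k-1] i) = (pvPi arr target)^[k-1+1] i :=
              (Function.iterate_succ_apply' _ _ _).symm
            rw [h1, show k - 1 + 1 = k from by omega, hcyc]
            simp
          | succ mm =>
            refine ⟨(pvPi arr target)^[mm] i, pv_iter_lt arr target hpre i hi mm, ?_⟩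
            exact (Function.iterate_succ_apply' _ _ _).symm

lemma pv_getD_replicate_false (n j : Nat) :
    (List.replicate n false).getD j false = false := by
  simp [List.getD_eq_getElem?_getD, List.getElem?_replicate]
  split_ifs <;> simp

-- ===== VERDICT (by name: the statement is the Claim_ definition above) =====
theorem calc_swaps_num_spec : Claim_equal_calc_swaps_num := by
  intro arr target hdom hpre
  show calc_swaps_num arr target = calc_swaps_num_alt arr target
  unfold calc_swaps_num calc_swaps_num_alt
  exact pv_outer arr target hpre (List.range arr.length)
    (fun i hi => List.mem_range.mp hi) arr (List.replicate arr.length false) 0 rfl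
    (by simp)
    (fun j hj h => absurd (by rw [pv_getD_replicate_false] at h; exact h) (by simp))
    (fun j hj h => rfl)
    (fun j hj h => absurd (by rw [pv_getD_replicate_false] at h; exact h) (by simp))
    (fun j hj h => absurd (by rw [pv_getD_replicate_false] at h; exact h) (by simp))
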